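-- pv_equiv track=rewrite | github.com/juano327/Proyectos | algoritmos_De_Busqueda/Algoritmo_Genetico.py | crear_mapa_almacen
-- ===== SOURCE A (Python) =====
-- almacen_dim = (11, 13)
--
-- estacion_carga = (5, 0)
--
-- estanterias = {i: (x, y) for i, (x, y) in enumerate([
--     (1, 2), (1, 3), (2, 2), (2, 3), (3, 2), (3, 3), (4, 2), (4, 3),
--     (1, 6), (1, 7), (2, 6), (2, 7), (3, 6), (3, 7), (4, 6), (4, 7),
--     (1, 10), (1, 11), (2, 10), (2, 11), (3, 10), (3, 11), (4, 10), (4, 11),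
--     (6, 2), (6, 3), (7, 2), (7, 3), (8, 2), (8, 3), (9, 2), (9, 3),
--     (6, 6), (6, 7), (7, 6), (7, 7), (8, 6), (8, 7), (9, 6), (9, 7),
--     (6, 10), (6, 11), (7, 10), (7, 11), (8, 10), (8, 11), (9, 10), (9, 11)
-- ])}
--
-- def crear_mapa_almacen(configuracion):
--     mapa = [['.' for _ in range(almacen_dim[1])] for _ in range(almacen_dim[0])]
--
--     # Colocar la estación de carga
--     mapa[estacion_carga[0]][estacion_carga[1]] = 'C'
--
--     # Colocar productos en estanterías
--     for idx, producto in enumerate(configuracion):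
--         if idx in estanterias:
--             x, y = estanterias[idx]
--             mapa[x][y] = str(producto)
--
--     return mapa
-- ===== SOURCE B (Python) =====
-- # B: no shelf table and no grid mutation -- each cell's content is computed
-- # directly from a closed-form coordinate->shelf-index formula, and the grid is
-- # built as one nested comprehension.
-- def crear_mapa_almacen(configuracion):
--     cfg = list(configuracion)
--
--     def celda(x, y):
--         if x == 5 and y == 0:
--             return 'C'
--         # shelf cells: x in 1..9 except 5, y in {2,3,6,7,10,11}
--         if x != 5 and 1 <= x <= 9 and 2 <= y <= 11 and (y - 2) % 4 < 2:
--             idx = ((24 if x > 5 else 0)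
--                    + ((y - 2) // 4) * 8
--                    + ((x - 1) if x < 5 else (x - 6)) * 2
--                    + (y - 2) % 4)
--             if idx < len(cfg):
--                 return str(cfg[idx])
--         return '.'
--
--     return [[celda(x, y) for y in range(13)] for x in range(11)]
-- ===== Notes on version B (the rewrite author's own statement) =====
-- stated objective: alternative
-- what changed: B replaces A's allocate-then-mutate pass over enumerate(configuracion) with a pure nested comprehension over the grid coordinates, computing each cell directly from a closed-form coordinate-to-shelf-index formula (no shelf table, no mutation); it never scans configuracion beyond its length, only indexes the first 48 slots.
import Mathlib
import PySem

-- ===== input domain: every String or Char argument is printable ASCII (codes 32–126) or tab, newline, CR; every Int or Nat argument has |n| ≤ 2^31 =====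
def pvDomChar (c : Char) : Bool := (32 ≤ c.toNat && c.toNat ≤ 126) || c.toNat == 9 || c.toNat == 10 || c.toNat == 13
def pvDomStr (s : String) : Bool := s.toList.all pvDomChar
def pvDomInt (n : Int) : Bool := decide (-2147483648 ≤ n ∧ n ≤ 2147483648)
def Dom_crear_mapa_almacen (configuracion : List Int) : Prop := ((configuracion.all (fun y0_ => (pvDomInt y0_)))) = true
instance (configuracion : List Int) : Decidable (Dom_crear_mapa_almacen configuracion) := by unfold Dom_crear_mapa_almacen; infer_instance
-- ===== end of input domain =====

-- B builds the grid as one nested comprehension, computing each cell directly from a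
-- closed-form coordinate→shelf-index formula (no shelf table, no grid mutation);
-- alternative decomposition, same cost.


-- ===== PORT A =====
-- the literal coordinate list the module builds estanterias from
def pvShelfLiterals : List (Int × Int) := [
  (1, 2), (1, 3), (2, 2), (2, 3), (3, 2), (3, 3), (4, 2), (4, 3),
  (1, 6), (1, 7), (2, 6), (2, 7), (3, 6), (3, 7), (4, 6), (4, 7),
  (1, 10), (1, 11), (2, 10), (2, 11), (3, 10), (3, 11), (4, 10), (4, 11),
  (6, 2), (6, 3), (7, 2), (7, 3), (8, 2), (8, 3), (9, 2), (9, 3),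
  (6, 6), (6, 7), (7, 6), (7, 7), (8, 6), (8, 7), (9, 6), (9, 7),
  (6, 10), (6, 11), (7, 10), (7, 11), (8, 10), (8, 11), (9, 10), (9, 11)]

-- estanterias = {i: (x, y) for i, (x, y) in enumerate([...])}
def pvEstanterias : PySem.Dict Int (Int × Int) :=
  (PySem.List.enumerate pvShelfLiterals).foldl (fun d p => d.insert p.1 p.2) PySem.Dict.empty

-- mapa[x][y] = v  (x, y are always non-negative in-range constants here, so
-- List.set/getD with .toNat is exact)
def pvSetCell (g : List (List String)) (x y : Int) (v : String) : List (List String) :=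
  g.set x.toNat ((g.getD x.toNat []).set y.toNat v)

def crear_mapa_almacen (configuracion : List Int) : List (List String) :=
  let mapa : List (List String) :=
    (List.range 11).map (fun _ => (List.range 13).map (fun _ => "."))
  let mapa := pvSetCell mapa 5 0 "C"
  (PySem.List.enumerate configuracion).foldl
    (fun m p =>
      match PySem.Dict.get? pvEstanterias p.1 with
      | some xy => pvSetCell m xy.1 xy.2 (PySem.Int.toStr p.2)
      | none => m) mapa

-- ===== PORT B =====
-- Source B's shelf test  x != 5 and 1 <= x <= 9 and 2 <= y <= 11 and (y-2) % 4 < 2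
def pvEsEstante (x y : Int) : Bool :=
  decide (x ≠ 5 ∧ 1 ≤ x ∧ x ≤ 9 ∧ 2 ≤ y ∧ y ≤ 11 ∧ PySem.Int.mod (y - 2) 4 < 2)

-- Source B's closed-form shelf index
def pvIdxEstante (x y : Int) : Int :=
  (if x > 5 then (24 : Int) else 0) + (PySem.Int.floordiv (y - 2) 4) * 8
    + (if x < 5 then x - 1 else x - 6) * 2 + PySem.Int.mod (y - 2) 4

-- Source B's local 'celda'; cfg[idx] is read with getD .toNat, exact because the guard
-- ensures 0 ≤ idx < len(cfg)
def pvCelda (cfg : List Int) (x y : Int) : String :=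
  if x = 5 ∧ y = 0 then "C"
  else if pvEsEstante x y then
    (let idx := pvIdxEstante x y
     if idx < (cfg.length : Int) then PySem.Int.toStr (cfg.getD idx.toNat 0) else ".")
  else "."

def crear_mapa_almacen_alt (configuracion : List Int) : List (List String) :=
  (List.range 11).map (fun (x : Nat) =>
    (List.range 13).map (fun (y : Nat) => pvCelda configuracion (x : Int) (y : Int)))

-- ===== PRECONDITION & SPEC =====
def Spec_crear_mapa_almacen (configuracion : List Int) (out : List (List String)) : Prop := out = crear_mapa_almacen_alt configuracion
instance (configuracion : List Int) (out : List (List String)) : Decidable (Spec_crear_mapa_almacen configuracion out) := by unfold Spec_crear_mapa_almacen; infer_instance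

-- ===== CLAIM (what is proved, stated in full; the proofs are below) =====
def Claim_equal_crear_mapa_almacen : Prop := ∀ (configuracion : List Int), Dom_crear_mapa_almacen configuracion → Spec_crear_mapa_almacen configuracion (crear_mapa_almacen configuracion)

-- ===== LEMMAS AND PROOFS =====

-- reading one cell, and the grid-shape invariant
def pvGet2 (g : List (List String)) (i j : Nat) : String := (g.getD i []).getD j ""

def pvShaped (g : List (List String)) : Prop := g.length = 11 ∧ ∀ r ∈ g, r.length = 13

-- the base grid of both programs after placing 'C'
def pvBase : List (List String) :=
  pvSetCell ((List.range 11).map (fun _ => (List.range 13).map (fun _ => "."))) 5 0 "C"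

set_option maxRecDepth 8192 in
lemma pvEstanterias_items :
    pvEstanterias.items = PySem.List.enumerate pvShelfLiterals := by decide

set_option maxRecDepth 8192 in
lemma pvEstanterias_keys_nodup : pvEstanterias.keys.Nodup := by decide

-- lookup in the index-keyed dict IS list indexing into the coordinate list
lemma pvEstanterias_get (k : Nat) :
    PySem.Dict.get? pvEstanterias (k : Int) = pvShelfLiterals[k]? := by
  by_cases hk : k < 48
  · have hlen : k < pvShelfLiterals.length := by simpa [pvShelfLiterals] using hk
    have hm : ((k : Int), pvShelfLiterals[k]) ∈ pvEstanterias.items := by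
      rw [pvEstanterias_items]
      exact (PySem.List.mem_enumerate_iff _ _ _).mpr ⟨k, hlen, by simp⟩
    rw [PySem.Dict.get?_of_mem_items _ hm pvEstanterias_keys_nodup,
        List.getElem?_eq_getElem hlen]
  · have hlen : pvShelfLiterals.length ≤ k := by simp [pvShelfLiterals]; omega
    rw [List.getElem?_eq_none hlen]
    rw [PySem.Dict.get?_eq_none_iff_not_mem_keys _]
    intro hmem
    have : pvEstanterias.keys = PySem.List.pyRange 0 (pvShelfLiterals.length) 1 := by
      have := PySem.List.map_fst_enumerate (xs := pvShelfLiterals) (s := 0)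
      simpa [PySem.Dict.keys, pvEstanterias_items] using this
    rw [this] at hmem
    have := (PySem.List.mem_pyRange_one).mp hmem
    omega

-- A's enumerate-and-look-up loop is the fold over the zipped shelf list
lemma foldA_eq (l : List Int) : ∀ (k : Nat) (g : List (List String)),
    (PySem.List.enumerate l (k : Int)).foldl
      (fun m p =>
        match PySem.Dict.get? pvEstanterias p.1 with
        | some xy => pvSetCell m xy.1 xy.2 (PySem.Int.toStr p.2)
        | none => m) g
    = ((pvShelfLiterals.drop k).zip l).foldl
        (fun m p => pvSetCell m p.1.1 p.1.2 (PySem.Int.toStr p.2)) g := by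
  induction l with
  | nil => intro k g; simp [PySem.List.enumerate_nil]
  | cons v t ih =>
    intro k g
    rw [PySem.List.enumerate_cons]
    by_cases hk : k < pvShelfLiterals.length
    · rw [List.drop_eq_getElem_cons hk]
      simp only [List.zip_cons_cons, List.foldl_cons, pvEstanterias_get,
        List.getElem?_eq_getElem hk]
      have : ((k : Int) + 1) = ((k + 1 : Nat) : Int) := by push_cast; ring
      rw [this, ih (k + 1)]
    · have h1 : pvShelfLiterals.drop k = [] := List.drop_eq_nil_of_le (by omega)
      have h2 : pvShelfLiterals.drop (k + 1) = [] := List.drop_eq_nil_of_le (by omega)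
      simp only [List.foldl_cons, pvEstanterias_get,
        List.getElem?_eq_none (by omega : pvShelfLiterals.length ≤ k), h1]
      have : ((k : Int) + 1) = ((k + 1 : Nat) : Int) := by push_cast; ring
      rw [this, ih (k + 1), h2]
      simp

lemma shelf_bounds : ∀ c ∈ pvShelfLiterals, 0 ≤ c.1 ∧ c.1 < 11 ∧ 0 ≤ c.2 ∧ c.2 < 13 := by
  decide

lemma setCell_shaped (g : List (List String)) (x y : Int) (v : String)
    (hg : pvShaped g) (hx : 0 ≤ x ∧ x < 11) (_hy : 0 ≤ y ∧ y < 13) :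
    pvShaped (pvSetCell g x y v) := by
  obtain ⟨hlen, hrow⟩ := hg
  constructor
  · simp [pvSetCell, hlen]
  · intro r hr
    rcases List.mem_or_eq_of_mem_set hr with h | h
    · exact hrow r h
    · subst h
      have hxn : x.toNat < g.length := by omega
      have : g.getD x.toNat [] = g[x.toNat] := by
        simp [List.getD, List.getElem?_eq_getElem hxn]
      rw [List.length_set, this]
      exact hrow _ (List.getElem_mem hxn)

lemma get2_setCell (g : List (List String)) (x y : Int) (v : String)
    (hg : pvShaped g) (hx : 0 ≤ x ∧ x < 11) (_hy : 0 ≤ y ∧ y < 13)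
    (i j : Nat) (hi : i < 11) (hj : j < 13) :
    pvGet2 (pvSetCell g x y v) i j
      = if x.toNat = i ∧ y.toNat = j then v else pvGet2 g i j := by
  obtain ⟨hlen, hrow⟩ := hg
  have hxn : x.toNat < g.length := by omega
  have hrowx : g.getD x.toNat [] = g[x.toNat] := by
    simp [List.getD, List.getElem?_eq_getElem hxn]
  have hrlen : (g.getD x.toNat []).length = 13 := by
    rw [hrowx]; exact hrow _ (List.getElem_mem hxn)
  by_cases hxi : x.toNat = i
  · subst hxi
    have hrw : (g.set x.toNat ((g.getD x.toNat []).set y.toNat v)).getD x.toNat []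
        = (g.getD x.toNat []).set y.toNat v := by
      rw [List.getD_eq_getElem?_getD, List.getElem?_set_eq_of_lt _ hxn]; rfl
    rw [pvGet2, pvSetCell, hrw]
    by_cases hyj : y.toNat = j
    · subst hyj
      have hyn : y.toNat < (g.getD x.toNat []).length := by omega
      rw [if_pos ⟨rfl, rfl⟩, List.getD_eq_getElem?_getD,
        List.getElem?_set_eq_of_lt _ hyn]
      rfl
    · rw [if_neg (by intro h; exact hyj h.2), pvGet2, List.getD_eq_getElem?_getD,
        List.getD_eq_getElem?_getD, List.getElem?_set_ne hyj]
      rfl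
  · have hrw : (g.set x.toNat ((g.getD x.toNat []).set y.toNat v)).getD i []
        = g.getD i [] := by
      rw [List.getD_eq_getElem?_getD, List.getElem?_set_ne hxi, ← List.getD_eq_getElem?_getD]
    rw [pvGet2, pvSetCell, hrw, if_neg (by intro h; exact hxi h.1), pvGet2]

lemma fold_shaped (ps : List ((Int × Int) × Int)) :
    ∀ (g : List (List String)), pvShaped g → (∀ p ∈ ps, p.1 ∈ pvShelfLiterals) →
    pvShaped (ps.foldl (fun m p => pvSetCell m p.1.1 p.1.2 (PySem.Int.toStr p.2)) g) := by
  induction ps with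
  | nil => intro g hg _; exact hg
  | cons p t ih =>
    intro g hg hmem
    have hb := shelf_bounds p.1 (hmem p (List.mem_cons_self))
    exact ih _ (setCell_shaped g _ _ _ hg ⟨hb.1, hb.2.1⟩ ⟨hb.2.2.1, hb.2.2.2⟩)
      (fun q hq => hmem q (List.mem_cons_of_mem _ hq))

-- what a cell holds after the write loop: the unique matching pair, else the base cell
lemma fold_get2 (ps : List ((Int × Int) × Int)) :
    ∀ (g : List (List String)), pvShaped g → (∀ p ∈ ps, p.1 ∈ pvShelfLiterals) →
    (ps.map Prod.fst).Nodup →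
    ∀ (i j : Nat), i < 11 → j < 13 →
    pvGet2 (ps.foldl (fun m p => pvSetCell m p.1.1 p.1.2 (PySem.Int.toStr p.2)) g) i j
      = match ps.find? (fun p => p.1 == ((i : Int), (j : Int))) with
        | some p => PySem.Int.toStr p.2
        | none => pvGet2 g i j := by
  induction ps with
  | nil => intro g hg _ _ i j hi hj; simp
  | cons p t ih =>
    intro g hg hmem hnd i j hi hj
    have hb := shelf_bounds p.1 (hmem p (List.mem_cons_self))
    have hg' := setCell_shaped g p.1.1 p.1.2 (PySem.Int.toStr p.2) hg
      ⟨hb.1, hb.2.1⟩ ⟨hb.2.2.1, hb.2.2.2⟩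
    have hmem' : ∀ q ∈ t, q.1 ∈ pvShelfLiterals :=
      fun q hq => hmem q (List.mem_cons_of_mem _ hq)
    have hnd' : (t.map Prod.fst).Nodup := (List.nodup_cons.mp (by simpa using hnd)).2
    have hrec := ih _ hg' hmem' hnd' i j hi hj
    rw [List.foldl_cons, hrec, List.find?_cons]
    by_cases hpc : p.1 = ((i : Int), (j : Int))
    · have hbeq : (p.1 == ((i : Int), (j : Int))) = true := by simp [hpc]
      have hnotin : p.1 ∉ t.map Prod.fst := (List.nodup_cons.mp (by simpa using hnd)).1
      have hfn : t.find? (fun q => q.1 == ((i : Int), (j : Int))) = none := by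
        rw [List.find?_eq_none]
        intro q hq hqeq
        have hq1 : q.1 = ((i : Int), (j : Int)) := by simpa using hqeq
        apply hnotin
        rw [hpc, ← hq1]
        exact List.mem_map_of_mem hq
      rw [hfn, hbeq]
      have : p.1.1.toNat = i ∧ p.1.2.toNat = j := by
        rw [hpc]; constructor <;> simp
      simp [get2_setCell g p.1.1 p.1.2 _ hg ⟨hb.1, hb.2.1⟩ ⟨hb.2.2.1, hb.2.2.2⟩ i j hi hj, this]
    · have hbeq : (p.1 == ((i : Int), (j : Int))) = false := by simp [hpc]
      rw [hbeq]
      have hne : ¬(p.1.1.toNat = i ∧ p.1.2.toNat = j) := by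
        rintro ⟨h1, h2⟩
        apply hpc
        have e1 : p.1.1 = (i : Int) := by omega
        have e2 : p.1.2 = (j : Int) := by omega
        exact Prod.ext e1 e2
      cases hf : t.find? (fun q => q.1 == ((i : Int), (j : Int))) with
      | some q => simp
      | none =>
        simp only
        rw [get2_setCell g p.1.1 p.1.2 _ hg ⟨hb.1, hb.2.1⟩ ⟨hb.2.2.1, hb.2.2.2⟩ i j hi hj]
        simp [hne]

-- find? over the zipped shelves at a coordinate that is the k-th shelf
lemma zip_find (s : List (Int × Int)) :
    s.Nodup → ∀ (k : Nat) (l : List Int) (c : Int × Int), s[k]? = some c →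
    (s.zip l).find? (fun p => p.1 == c) = (l[k]?).map (fun v => (c, v)) := by
  induction s with
  | nil => intro _ k l c h; simp at h
  | cons a s' ih =>
    intro hnd k l c hk
    have hnd' := (List.nodup_cons.mp hnd).2
    have hna := (List.nodup_cons.mp hnd).1
    cases k with
    | zero =>
      have hc : a = c := by simpa using hk
      subst hc
      cases l with
      | nil => simp
      | cons v l' => simp
    | succ k =>
      have hk' : s'[k]? = some c := by simpa using hk
      have hcm : c ∈ s' := List.mem_of_getElem? hk'
      have hac : (a == c) = false := by
        simp only [beq_eq_false_iff_ne]; intro h; exact hna (h ▸ hcm)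
      cases l with
      | nil => simp
      | cons v l' =>
        simp only [List.zip_cons_cons, List.find?_cons, hac]
        simpa using ih hnd' k l' c hk'

lemma shelf_nodup : pvShelfLiterals.Nodup := by decide

lemma mem_zip_shelf {l : List Int} {p : (Int × Int) × Int}
    (h : p ∈ pvShelfLiterals.zip l) : p.1 ∈ pvShelfLiterals :=
  (List.of_mem_zip h).1

lemma zip_fst_sublist (s : List (Int × Int)) :
    ∀ (l : List Int), ((s.zip l).map Prod.fst).Sublist s := by
  induction s with
  | nil => intro l; simp
  | cons a s' ih =>
    intro l
    cases l with
    | nil => simp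
    | cons v l' => simpa using List.Sublist.cons₂ a (ih l')

lemma zip_fst_nodup (l : List Int) : ((pvShelfLiterals.zip l).map Prod.fst).Nodup :=
  (zip_fst_sublist pvShelfLiterals l).nodup shelf_nodup

-- finite facts about the closed-form formula, the shelf list and the base grid
lemma fact_shelf : ∀ (i : Fin 11) (j : Fin 13), pvEsEstante (i.val : Int) (j.val : Int) = true →
    0 ≤ pvIdxEstante (i.val : Int) (j.val : Int) ∧
    pvShelfLiterals[(pvIdxEstante (i.val : Int) (j.val : Int)).toNat]?
      = some ((i.val : Int), (j.val : Int)) ∧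
    ¬((i.val : Int) = 5 ∧ (j.val : Int) = 0) := by decide

lemma fact_nonshelf : ∀ (i : Fin 11) (j : Fin 13),
    pvEsEstante (i.val : Int) (j.val : Int) = false →
    ¬((i.val : Int) = 5 ∧ (j.val : Int) = 0) →
    ((i.val : Int), (j.val : Int)) ∉ pvShelfLiterals := by decide

lemma fact_c_nonshelf : ((5 : Int), (0 : Int)) ∉ pvShelfLiterals := by decide

set_option maxRecDepth 100000 in
lemma fact_base : ∀ (i : Fin 11) (j : Fin 13),
    pvGet2 pvBase i.val j.val = if (i.val : Int) = 5 ∧ (j.val : Int) = 0 then "C" else "." := by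
  decide

lemma base_shaped : pvShaped pvBase := by
  apply setCell_shaped _ _ _ _ _ (by norm_num) (by norm_num)
  constructor
  · simp
  · intro r hr
    simp only [List.mem_map] at hr
    obtain ⟨x, _, hx⟩ := hr
    simp [← hx]

-- the per-cell value of the zipped fold equals Source B's closed-form cell
lemma cell_eq (cfg : List Int) (i : Fin 11) (j : Fin 13) :
    (match (pvShelfLiterals.zip cfg).find? (fun p => p.1 == ((i.val : Int), (j.val : Int))) with
     | some p => PySem.Int.toStr p.2
     | none => pvGet2 pvBase i.val j.val)
    = pvCelda cfg (i.val : Int) (j.val : Int) := by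
  by_cases hC : (i.val : Int) = 5 ∧ (j.val : Int) = 0
  · have hfn : (pvShelfLiterals.zip cfg).find?
        (fun p => p.1 == ((i.val : Int), (j.val : Int))) = none := by
      rw [List.find?_eq_none]
      intro p hp hbeq
      have hpe : p.1 = ((i.val : Int), (j.val : Int)) := by simpa using hbeq
      have : ((5 : Int), (0 : Int)) ∈ pvShelfLiterals := by
        rw [← hC.1, ← hC.2, ← hpe]; exact mem_zip_shelf hp
      exact fact_c_nonshelf this
    rw [hfn]
    show pvGet2 pvBase i.val j.val = pvCelda cfg (i.val : Int) (j.val : Int)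
    rw [fact_base i j, if_pos hC, pvCelda, if_pos hC]
  · cases hE : pvEsEstante (i.val : Int) (j.val : Int) with
    | false =>
      have hfn : (pvShelfLiterals.zip cfg).find?
          (fun p => p.1 == ((i.val : Int), (j.val : Int))) = none := by
        rw [List.find?_eq_none]
        intro p hp hbeq
        have hpe : p.1 = ((i.val : Int), (j.val : Int)) := by simpa using hbeq
        exact fact_nonshelf i j hE hC (hpe ▸ mem_zip_shelf hp)
      rw [hfn]
      show pvGet2 pvBase i.val j.val = pvCelda cfg (i.val : Int) (j.val : Int)
      rw [fact_base i j, if_neg hC, pvCelda, if_neg hC,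
        if_neg (by rw [hE]; exact Bool.false_ne_true)]
    | true =>
      obtain ⟨hnn, hget, -⟩ := fact_shelf i j hE
      have hfind := zip_find pvShelfLiterals shelf_nodup
        (pvIdxEstante (i.val : Int) (j.val : Int)).toNat cfg _ hget
      rw [hfind, pvCelda, if_neg hC, if_pos hE]
      show _ = (if pvIdxEstante (i.val : Int) (j.val : Int) < (cfg.length : Int) then
          PySem.Int.toStr (cfg.getD (pvIdxEstante (i.val : Int) (j.val : Int)).toNat 0)
        else ".")
      by_cases hlt : (pvIdxEstante (i.val : Int) (j.val : Int)).toNat < cfg.length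
      · have hlt' : pvIdxEstante (i.val : Int) (j.val : Int) < (cfg.length : Int) := by omega
        rw [List.getElem?_eq_getElem hlt, if_pos hlt', List.getD_eq_getElem?_getD,
          List.getElem?_eq_getElem hlt]
        rfl
      · have hlt' : ¬ pvIdxEstante (i.val : Int) (j.val : Int) < (cfg.length : Int) := by omega
        rw [List.getElem?_eq_none (by omega), if_neg hlt', Option.map_none]
        show pvGet2 pvBase i.val j.val = "."
        rw [fact_base i j, if_neg hC]

lemma get2_alt (cfg : List Int) (i : Fin 11) (j : Fin 13) :
    pvGet2 (crear_mapa_almacen_alt cfg) i.val j.val = pvCelda cfg (i.val : Int) (j.val : Int) := by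
  have h1 : (crear_mapa_almacen_alt cfg)[i.val]?
      = some ((List.range 13).map (fun (y : Nat) => pvCelda cfg (i.val : Int) (y : Int))) := by
    rw [crear_mapa_almacen_alt, List.getElem?_map, List.getElem?_range i.isLt]
    rfl
  rw [pvGet2]
  simp [List.getD_eq_getElem?_getD, h1]

lemma alt_shaped (cfg : List Int) : pvShaped (crear_mapa_almacen_alt cfg) := by
  constructor
  · simp [crear_mapa_almacen_alt]
  · intro r hr
    simp only [crear_mapa_almacen_alt, List.mem_map] at hr
    obtain ⟨x, _, hx⟩ := hr
    simp [← hx]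

lemma grid_ext (g1 g2 : List (List String)) (h1 : pvShaped g1) (h2 : pvShaped g2)
    (h : ∀ (i : Fin 11) (j : Fin 13), pvGet2 g1 i.val j.val = pvGet2 g2 i.val j.val) :
    g1 = g2 := by
  apply List.ext_getElem (by rw [h1.1, h2.1])
  intro i hi1 hi2
  have hi : i < 11 := by rw [h1.1] at hi1; exact hi1
  apply List.ext_getElem
  · rw [h1.2 _ (List.getElem_mem hi1), h2.2 _ (List.getElem_mem hi2)]
  · intro j hj1 hj2
    have hj : j < 13 := by
      have hl := h1.2 _ (List.getElem_mem hi1); rw [hl] at hj1; exact hj1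
    have hcell := h ⟨i, hi⟩ ⟨j, hj⟩
    simpa [pvGet2, List.getD_eq_getElem?_getD, List.getElem?_eq_getElem,
      hi1, hi2, hj1, hj2] using hcell

-- ===== VERDICT (by name: the statement is the Claim_ definition above) =====
set_option maxRecDepth 100000 in
theorem crear_mapa_almacen_spec : Claim_equal_crear_mapa_almacen := by
  intro cfg _
  unfold Spec_crear_mapa_almacen
  have hA : crear_mapa_almacen cfg
      = (pvShelfLiterals.zip cfg).foldl
          (fun m p => pvSetCell m p.1.1 p.1.2 (PySem.Int.toStr p.2)) pvBase := by
    have h := foldA_eq cfg 0 pvBase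
    simp only [Nat.cast_zero, List.drop_zero] at h
    exact h
  rw [hA]
  apply grid_ext _ _
    (fold_shaped _ pvBase base_shaped (fun p hp => mem_zip_shelf hp))
    (alt_shaped cfg)
  intro i j
  rw [fold_get2 _ pvBase base_shaped (fun p hp => mem_zip_shelf hp)
    (zip_fst_nodup cfg) i.val j.val i.isLt j.isLt]
  rw [get2_alt]
  exact cell_eq cfg i j
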